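-- pv_equiv track=rewrite | github.com/sep252/SUCTF-2026 | misc/SU_Artifact_Online/sourcecode/server/src/server.py | rotate_vector
-- ===== SOURCE A (Python) =====
-- def rotate_vector(
--     vec: tuple[int, int, int], axis: str, quarter_turns: int,
-- ) -> tuple[int, int, int]:
--     x, y, z = vec
--     for _ in range(quarter_turns % 4):
--         if axis == "x":
--             x, y, z = x, -z, y
--         elif axis == "y":
--             x, y, z = z, y, -x
--         elif axis == "z":
--             x, y, z = -y, x, z
--         else:
--             raise ValueError(f"Unsupported axis: {axis}")
--     return (x, y, z)
-- ===== SOURCE B (Python) =====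
-- def rotate_vector(
--     vec: tuple[int, int, int], axis: str, quarter_turns: int,
-- ) -> tuple[int, int, int]:
--     n = quarter_turns % 4
--     if n == 0:
--         return vec
--     if axis not in ("x", "y", "z"):
--         raise ValueError(f"Unsupported axis: {axis}")
--     c = (1, 0, -1, 0)[n]
--     s = (0, 1, 0, -1)[n]
--     x, y, z = vec
--     if axis == "x":
--         return (x, y * c - z * s, y * s + z * c)
--     if axis == "y":
--         return (x * c + z * s, y, -x * s + z * c)
--     return (x * c - y * s, x * s + y * c, z)
-- ===== Notes on version B (the rewrite author's own statement) =====
-- stated objective: simpler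
-- what changed: Replaces the loop of up to three successive quarter-turn swaps by a single application of the standard integer rotation matrix with cos/sin taken from tables indexed by quarter_turns % 4.
import Mathlib
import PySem

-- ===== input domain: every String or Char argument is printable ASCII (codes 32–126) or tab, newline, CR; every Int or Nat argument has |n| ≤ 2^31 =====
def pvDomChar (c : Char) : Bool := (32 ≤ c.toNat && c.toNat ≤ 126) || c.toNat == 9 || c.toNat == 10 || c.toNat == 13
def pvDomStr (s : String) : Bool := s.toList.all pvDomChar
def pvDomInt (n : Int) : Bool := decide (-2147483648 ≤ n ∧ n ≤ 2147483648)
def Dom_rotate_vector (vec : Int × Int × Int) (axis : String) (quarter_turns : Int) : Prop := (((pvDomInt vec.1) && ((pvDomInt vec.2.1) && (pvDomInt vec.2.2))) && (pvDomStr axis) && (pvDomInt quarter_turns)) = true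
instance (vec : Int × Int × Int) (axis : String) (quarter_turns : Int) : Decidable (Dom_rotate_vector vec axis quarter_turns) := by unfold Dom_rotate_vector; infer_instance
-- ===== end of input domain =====

-- B replaces A's loop of repeated quarter-turn swaps by one application of the integer
-- rotation matrix with cos/sin from tables indexed by quarter_turns % 4 (objective: simpler).

-- ===== PORT A =====
-- A's for-loop over range(quarter_turns % 4): structural recursion on the iteration count,
-- applying the same branch chain to the state (x, y, z) each iteration.
-- The 'else: raise ValueError' branch is excluded by Pre_; there the state is left unchanged.
def rotALoop (axis : String) : Nat → Int × Int × Int → Int × Int × Int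
  | 0, s => s
  | n + 1, (x, y, z) =>
      rotALoop axis n
        (if axis = "x" then (x, -z, y)
         else if axis = "y" then (z, y, -x)
         else if axis = "z" then (-y, x, z)
         else (x, y, z))

def rotate_vector (vec : Int × Int × Int) (axis : String) (quarter_turns : Int) : Int × Int × Int :=
  rotALoop axis (PySem.Int.mod quarter_turns 4).toNat vec

-- ===== PORT B =====
def rotate_vector_alt (vec : Int × Int × Int) (axis : String) (quarter_turns : Int) : Int × Int × Int :=
  let n := PySem.Int.mod quarter_turns 4
  if n = 0 then vec
  else
    -- bad axis raises in B too; excluded by Pre_, state returned unchanged there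
    if axis ≠ "x" ∧ axis ≠ "y" ∧ axis ≠ "z" then vec
    else
      let c := (PySem.List.pyGet? [(1 : Int), 0, -1, 0] n).getD 0  -- n ∈ {1,2,3}: never none
      let s := (PySem.List.pyGet? [(0 : Int), 1, 0, -1] n).getD 0
      let (x, y, z) := vec
      if axis = "x" then (x, y * c - z * s, y * s + z * c)
      else if axis = "y" then (x * c + z * s, y, -x * s + z * c)
      else (x * c - y * s, x * s + y * c, z)

-- ===== PRECONDITION & SPEC =====
-- Pre_ excludes exactly the inputs where A (and B) raise ValueError: an axis other than
-- "x"/"y"/"z" together with quarter_turns % 4 ≠ 0 (when quarter_turns % 4 == 0 the loop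
-- body never runs and no validation happens).
def Pre_rotate_vector (vec : Int × Int × Int) (axis : String) (quarter_turns : Int) : Prop :=
  PySem.Int.mod quarter_turns 4 = 0 ∨ axis = "x" ∨ axis = "y" ∨ axis = "z"
instance (vec : Int × Int × Int) (axis : String) (quarter_turns : Int) : Decidable (Pre_rotate_vector vec axis quarter_turns) := by unfold Pre_rotate_vector; infer_instance

def pvWitness_rotate_vector : (Int × Int × Int) × String × Int := ((1, 2, 3), "x", 5)

def Spec_rotate_vector (vec : Int × Int × Int) (axis : String) (quarter_turns : Int) (out : Int × Int × Int) : Prop := out = rotate_vector_alt vec axis quarter_turns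
instance (vec : Int × Int × Int) (axis : String) (quarter_turns : Int) (out : Int × Int × Int) : Decidable (Spec_rotate_vector vec axis quarter_turns out) := by unfold Spec_rotate_vector; infer_instance

-- ===== CLAIM (what is proved, stated in full; the proofs are below) =====
def Claim_equal_rotate_vector : Prop := ∀ (vec : Int × Int × Int) (axis : String) (quarter_turns : Int), Dom_rotate_vector vec axis quarter_turns → Pre_rotate_vector vec axis quarter_turns → Spec_rotate_vector vec axis quarter_turns (rotate_vector vec axis quarter_turns)

-- ===== LEMMAS AND PROOFS =====

-- A's and B's results agree for each of the four possible values of quarter_turns % 4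
-- once the axis is fixed; each case is a finite computation on the components.
theorem rotALoop_x (n : Nat) (x y z : Int) (hn : n ≤ 3) :
    rotALoop "x" n (x, y, z) =
      rotate_vector_alt (x, y, z) "x" (n : Int) := by
  interval_cases n <;>
    simp [rotALoop, rotate_vector_alt, PySem.Int.mod, PySem.List.pyGet?, PySem.List.pyIdx?] <;> ring_nf

theorem rotALoop_y (n : Nat) (x y z : Int) (hn : n ≤ 3) :
    rotALoop "y" n (x, y, z) =
      rotate_vector_alt (x, y, z) "y" (n : Int) := by
  interval_cases n <;>
    simp [rotALoop, rotate_vector_alt, PySem.Int.mod, PySem.List.pyGet?, PySem.List.pyIdx?] <;> ring_nf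

theorem rotALoop_z (n : Nat) (x y z : Int) (hn : n ≤ 3) :
    rotALoop "z" n (x, y, z) =
      rotate_vector_alt (x, y, z) "z" (n : Int) := by
  interval_cases n <;>
    simp [rotALoop, rotate_vector_alt, PySem.Int.mod, PySem.List.pyGet?, PySem.List.pyIdx?] <;> ring_nf

theorem mod4_cases (q : Int) :
    PySem.Int.mod q 4 = 0 ∨ PySem.Int.mod q 4 = 1 ∨ PySem.Int.mod q 4 = 2 ∨ PySem.Int.mod q 4 = 3 := by
  have h1 := PySem.Int.mod_nonneg q (b := 4) (by norm_num)
  have h2 := PySem.Int.mod_lt q (b := 4) (by norm_num)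
  omega

theorem alt_mod_idem (vec : Int × Int × Int) (axis : String) (q : Int) :
    rotate_vector_alt vec axis (PySem.Int.mod q 4) = rotate_vector_alt vec axis q := by
  rcases mod4_cases q with h | h | h | h <;>
    simp [rotate_vector_alt, h, PySem.Int.mod]

-- ===== VERDICT (by name: the statement is the Claim_ definition above) =====
theorem rotate_vector_spec : Claim_equal_rotate_vector := by
  intro vec axis q _ hpre
  obtain ⟨x, y, z⟩ := vec
  unfold Spec_rotate_vector rotate_vector
  have hmc := mod4_cases q
  rcases hpre with h0 | hx | hy | hz
  · unfold rotate_vector_alt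
    rw [h0]
    simp [rotALoop]
  · subst hx
    rw [← alt_mod_idem (x, y, z) "x" q]
    rcases hmc with h | h | h | h <;> rw [h] <;>
      exact rotALoop_x _ x y z (by norm_num)
  · subst hy
    rw [← alt_mod_idem (x, y, z) "y" q]
    rcases hmc with h | h | h | h <;> rw [h] <;>
      exact rotALoop_y _ x y z (by norm_num)
  · subst hz
    rw [← alt_mod_idem (x, y, z) "z" q]
    rcases hmc with h | h | h | h <;> rw [h] <;>
      exact rotALoop_z _ x y z (by norm_num)
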